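-- pv_equiv track=rewrite | github.com/piskvorky/smart_open | release/check_preamble.py | extract_preamble
-- ===== SOURCE A (Python) =====
-- def extract_preamble(fin):
--     end_preamble = False
--     preamble, body = [], []
--
--     for line in fin:
--         if end_preamble:
--             body.append(line)
--         elif line.startswith('#'):
--             preamble.append(line)
--         else:
--             end_preamble = True
--             body.append(line)
--
--     return preamble, body
-- ===== SOURCE B (Python) =====
-- def extract_preamble(fin):
--     lines = list(fin)
--     i = next((j for j, line in enumerate(lines) if not line.startswith('#')), len(lines))
--     return lines[:i], lines[i:]
-- ===== Notes on version B (the rewrite author's own statement) =====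
-- stated objective: simpler
-- what changed: Replaces the per-line boolean-flag loop appending into two accumulators with finding the index of the first non-comment line and slicing the list there.
import Mathlib
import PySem

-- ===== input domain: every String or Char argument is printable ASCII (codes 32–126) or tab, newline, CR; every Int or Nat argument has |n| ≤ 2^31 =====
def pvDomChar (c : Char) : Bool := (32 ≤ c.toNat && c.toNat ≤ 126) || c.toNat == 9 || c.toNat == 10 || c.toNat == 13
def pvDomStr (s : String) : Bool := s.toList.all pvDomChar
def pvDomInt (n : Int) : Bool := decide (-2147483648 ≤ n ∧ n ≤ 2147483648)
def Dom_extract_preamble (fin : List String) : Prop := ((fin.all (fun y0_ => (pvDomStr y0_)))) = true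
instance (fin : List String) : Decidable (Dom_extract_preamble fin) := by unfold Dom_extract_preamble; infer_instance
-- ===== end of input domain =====

-- B changes the decomposition: find the first non-comment index and slice, instead of A's flagged loop; objective: simpler.

-- ===== PORT A =====
-- loop body of A's for-loop over the state (end_preamble, preamble, body)
def epStep (s : Bool × List String × List String) (line : String) : Bool × List String × List String :=
  if s.1 then (s.1, s.2.1, s.2.2 ++ [line])
  else if PySem.Str.startswith line "#" then (s.1, s.2.1 ++ [line], s.2.2)
  else (true, s.2.1, s.2.2 ++ [line])

def extract_preamble (fin : List String) : List String × List String :=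
  let st := fin.foldl epStep (false, [], [])
  (st.2.1, st.2.2)

-- ===== PORT B =====
-- index of the first line not starting with '#' (length if none): the 'next(... enumerate ...)' of Source B
def epFirstNonComment : List String → Nat
  | [] => 0
  | l :: ls => if PySem.Str.startswith l "#" then 1 + epFirstNonComment ls else 0

def extract_preamble_alt (fin : List String) : List String × List String :=
  let i := epFirstNonComment fin
  (fin.take i, fin.drop i)

-- ===== PRECONDITION & SPEC =====
def Spec_extract_preamble (fin : List String) (out : List String × List String) : Prop := out = extract_preamble_alt fin
instance (fin : List String) (out : List String × List String) : Decidable (Spec_extract_preamble fin out) := by unfold Spec_extract_preamble; infer_instance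

-- ===== CLAIM (what is proved, stated in full; the proofs are below) =====
def Claim_equal_extract_preamble : Prop := ∀ (fin : List String), Dom_extract_preamble fin → Spec_extract_preamble fin (extract_preamble fin)

-- ===== LEMMAS AND PROOFS =====
lemma epFold_true (fin : List String) (p b : List String) :
    fin.foldl epStep (true, p, b) = (true, p, b ++ fin) := by
  induction fin generalizing b with
  | nil => simp
  | cons l ls ih => simp [epStep, ih]

lemma epFold_false (fin : List String) (p b : List String) :
    (fin.foldl epStep (false, p, b)).2 =
      (p ++ fin.take (epFirstNonComment fin), b ++ fin.drop (epFirstNonComment fin)) := by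
  induction fin generalizing p b with
  | nil => simp [epFirstNonComment]
  | cons l ls ih =>
    by_cases h : PySem.Chars.startswith l.toList ['#']
    · simp [epStep, epFirstNonComment, PySem.Str.startswith, h, ih, Nat.one_add]
    · simp [epStep, epFirstNonComment, PySem.Str.startswith, h, epFold_true]

-- ===== VERDICT (by name: the statement is the Claim_ definition above) =====
theorem extract_preamble_spec : Claim_equal_extract_preamble := by
  intro fin _
  unfold Spec_extract_preamble extract_preamble extract_preamble_alt
  simpa using epFold_false fin [] []
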